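-- pv_equiv track=rewrite | github.com/provoware/provoware-download-clean-stool | core/settings.py | _normalize_allowed_file_types
-- ===== SOURCE A (Python) =====
-- from typing import Dict, List
--
-- def _normalize_allowed_file_types(raw_types: object) -> List[str]:
--     """Normalize selected file types with safe defaults for novice users."""
--
--     allowed = {"images", "documents", "videos", "audio", "archives", "other"}
--     if not isinstance(raw_types, list):
--         raise ValueError(
--             "Dateitypen-Auswahl ist ungültig. Nächster Schritt: Bitte Dateitypen per Schalter neu wählen."
--         )
--     normalized = [
--         str(item).strip().lower() for item in raw_types if str(item).strip()
--     ]
--     filtered = [item for item in normalized if item in allowed]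
--     if not filtered:
--         return ["images", "documents", "videos", "other"]
--     return list(dict.fromkeys(filtered))
-- ===== SOURCE B (Python) =====
-- from typing import List
--
-- def _normalize_allowed_file_types(raw_types: object) -> List[str]:
--     """Inverted scan: find each allowed type's first occurrence, then sort by position."""
--     if not isinstance(raw_types, list):
--         raise ValueError(
--             "Dateitypen-Auswahl ist ungültig. Nächster Schritt: Bitte Dateitypen per Schalter neu wählen."
--         )
--     norm = [str(item).strip().lower() for item in raw_types if str(item).strip()]
--     positions = []
--     for t in ("images", "documents", "videos", "audio", "archives", "other"):
--         try:
--             positions.append((norm.index(t), t))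
--         except ValueError:
--             pass
--     if not positions:
--         return ["images", "documents", "videos", "other"]
--     positions.sort(key=lambda p: p[0])
--     return [t for _, t in positions]
-- ===== Notes on version B (the rewrite author's own statement) =====
-- stated objective: alternative
-- what changed: Instead of filtering the normalized input against the allowed set and order-preserving deduping with dict.fromkeys, B inverts the iteration: it looks up each of the six fixed allowed types' first occurrence index in the normalized list (list.index with try/except) and sorts the found (index, type) pairs by position.
import Mathlib
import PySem

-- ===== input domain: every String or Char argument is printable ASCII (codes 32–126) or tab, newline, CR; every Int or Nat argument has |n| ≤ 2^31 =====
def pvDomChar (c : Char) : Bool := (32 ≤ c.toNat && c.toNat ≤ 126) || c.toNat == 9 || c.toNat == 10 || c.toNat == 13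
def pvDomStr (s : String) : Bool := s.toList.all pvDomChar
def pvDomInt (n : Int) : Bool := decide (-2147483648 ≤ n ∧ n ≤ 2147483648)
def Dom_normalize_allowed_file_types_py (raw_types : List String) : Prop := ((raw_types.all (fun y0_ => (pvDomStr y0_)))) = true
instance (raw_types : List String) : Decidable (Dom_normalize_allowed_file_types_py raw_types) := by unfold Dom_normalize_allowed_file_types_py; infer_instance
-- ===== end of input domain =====

-- B inverts A's scan: instead of filtering the normalized input against the allowed set and
-- deduping with dict.fromkeys, it looks up each of the six allowed types' first occurrence
-- index in the normalized list and sorts the hits by position; same return value, no speed claim.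


-- ===== PORT A =====
-- allowed = {"images", "documents", "videos", "audio", "archives", "other"}
def pvAllowedA : PySem.Set String :=
  PySem.Set.ofList ["images", "documents", "videos", "audio", "archives", "other"]

-- The isinstance-list guard of A cannot fire here: the argument is typed List String.
def normalize_allowed_file_types_py (raw_types : List String) : List String :=
  let normalized := (raw_types.filter (fun item => PySem.Str.strip item ≠ "")).map
      (fun item => PySem.Str.lower (PySem.Str.strip item))
  let filtered := normalized.filter (fun item => PySem.Set.contains pvAllowedA item)
  if filtered = [] then ["images", "documents", "videos", "other"]
  else PySem.List.dedup filtered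

-- ===== PORT B =====
-- the fixed tuple of allowed types Source B iterates over
def pvAllowedOrder : List String := ["images", "documents", "videos", "audio", "archives", "other"]

-- norm = [str(item).strip().lower() for item in raw_types if str(item).strip()]
def pvNormB (raw_types : List String) : List String :=
  (raw_types.filter (fun item => PySem.Str.strip item ≠ "")).map
    (fun item => PySem.Str.lower (PySem.Str.strip item))

-- the for-loop over the allowed tuple: try norm.index(t) / except ValueError: pass
def pvPositions (norm : List String) : List (Int × String) :=
  pvAllowedOrder.foldl (fun acc t =>
    match PySem.List.index? norm t with
    | some i => acc ++ [((i : Int), t)]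
    | none => acc) []

def normalize_allowed_file_types_py_alt (raw_types : List String) : List String :=
  let positions := pvPositions (pvNormB raw_types)
  if positions = [] then ["images", "documents", "videos", "other"]
  else (PySem.List.sorted positions (fun p => p.1) false).map (fun p => p.2)

-- ===== PRECONDITION & SPEC =====
def Spec_normalize_allowed_file_types_py (raw_types : List String) (out : List String) : Prop := out = normalize_allowed_file_types_py_alt raw_types
instance (raw_types : List String) (out : List String) : Decidable (Spec_normalize_allowed_file_types_py raw_types out) := by unfold Spec_normalize_allowed_file_types_py; infer_instance

-- ===== CLAIM (what is proved, stated in full; the proofs are below) =====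
def Claim_equal_normalize_allowed_file_types_py : Prop := ∀ (raw_types : List String), Dom_normalize_allowed_file_types_py raw_types → Spec_normalize_allowed_file_types_py raw_types (normalize_allowed_file_types_py raw_types)

-- ===== LEMMAS AND PROOFS =====

-- A's filtered list (proof-side name)
def pvFiltered (raw_types : List String) : List String :=
  (pvNormB raw_types).filter (fun item => PySem.Set.contains pvAllowedA item)

-- the position loop, as a filterMap over the allowed tuple
lemma pvFoldl_positions (norm : List String) : ∀ (l : List String) (acc : List (Int × String)),
    (l.foldl (fun acc t =>
      match PySem.List.index? norm t with
      | some i => acc ++ [((i : Int), t)]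
      | none => acc) acc)
      = acc ++ l.filterMap (fun t => (PySem.List.index? norm t).map (fun i => ((i : Int), t))) := by
  intro l
  induction l with
  | nil => intro acc; simp
  | cons x l ih =>
    intro acc
    cases h : PySem.List.index? norm x with
    | none =>
      simp only [List.foldl_cons, List.filterMap_cons, h]
      exact ih acc
    | some i =>
      simp only [List.foldl_cons, List.filterMap_cons, h]
      rw [ih (acc ++ [((i : Int), x)])]
      simp

lemma pvPositions_eq_filterMap (norm : List String) :
    pvPositions norm
      = pvAllowedOrder.filterMap (fun t => (PySem.List.index? norm t).map (fun i => ((i : Int), t))) := by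
  simpa using pvFoldl_positions norm pvAllowedOrder []

lemma pvIndex?_of_mem (t : String) : ∀ (N : List String), t ∈ N →
    PySem.List.index? N t = some (N.idxOf t) := by
  intro N
  induction N with
  | nil => intro h; simp at h
  | cons x N ih =>
    intro h
    by_cases hx : x = t
    · subst hx; rw [PySem.List.index?_cons_self, List.idxOf_cons_self]
    · have ht : t ∈ N := by
        rcases List.mem_cons.1 h with h' | h'
        · exact absurd h'.symm hx
        · exact h'
      rw [PySem.List.index?_cons_of_ne N hx, ih ht, List.idxOf_cons_ne N hx]
      rfl

-- dedup of a filtered list is strictly increasing in first-occurrence index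
lemma pvDedup_filter_pairwise_idx (p : String → Bool) : ∀ (xs : List String),
    (PySem.List.dedup (xs.filter p)).Pairwise (fun a b => xs.idxOf a < xs.idxOf b) := by
  intro xs
  induction xs with
  | nil => simp
  | cons x xs ih =>
    rw [PySem.List.dedup_eq_ofList] at *
    have hmem : ∀ a ∈ (PySem.Set.ofList (xs.filter p)), a ∈ xs ∧ p a = true := by
      intro a ha
      have := (PySem.Set.mem_ofList _ _).1 ha
      exact ⟨(List.mem_filter.1 this).1, (List.mem_filter.1 this).2⟩
    by_cases hp : p x
    · rw [List.filter_cons_of_pos hp, PySem.Set.ofList_cons]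
      refine List.pairwise_cons.2 ⟨?_, ?_⟩
      · intro b hb
        have hb' := (PySem.Set.mem_discard _ _ _).1 hb
        have hbne : b ≠ x := hb'.2
        rw [List.idxOf_cons_self, List.idxOf_cons_ne _ (fun h => hbne h.symm)]
        omega
      · have hsub : ((PySem.Set.ofList (xs.filter p)).discard x).Sublist (PySem.Set.ofList (xs.filter p)) := by
          show (List.filter _ _).Sublist _
          exact List.filter_sublist
        refine (ih.sublist hsub).imp_of_mem ?_
        intro a b ha hb hab
        have hane : a ≠ x := ((PySem.Set.mem_discard _ _ _).1 ha).2
        have hbne : b ≠ x := ((PySem.Set.mem_discard _ _ _).1 hb).2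
        rw [List.idxOf_cons_ne _ (fun h => hane h.symm), List.idxOf_cons_ne _ (fun h => hbne h.symm)]
        omega
    · rw [List.filter_cons_of_neg hp]
      refine ih.imp_of_mem ?_
      intro a b ha hb hab
      have hane : a ≠ x := fun h => hp (h ▸ (hmem a ha).2)
      have hbne : b ≠ x := fun h => hp (h ▸ (hmem b hb).2)
      rw [List.idxOf_cons_ne _ (fun h => hane h.symm), List.idxOf_cons_ne _ (fun h => hbne h.symm)]
      omega

lemma pvMem_allowed (t : String) : PySem.Set.contains pvAllowedA t = decide (t ∈ pvAllowedOrder) := by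
  have h1 : PySem.Set.contains pvAllowedA t = decide (t ∈ pvAllowedA) := List.contains_eq_mem t _
  rw [h1]
  have : t ∈ pvAllowedA ↔ t ∈ pvAllowedOrder := PySem.Set.mem_ofList _ _
  simp [this]

lemma pvSorted_positions (raw_types : List String) :
    PySem.List.sorted (pvPositions (pvNormB raw_types)) (fun p => p.1) false
      = (PySem.List.dedup (pvFiltered raw_types)).map
          (fun t => (((pvNormB raw_types).idxOf t : Int), t)) := by
  set N := pvNormB raw_types with hN
  apply PySem.List.sorted_eq_of_perm_of_pairwise_lt
  · -- Perm
    rw [pvPositions_eq_filterMap, PySem.List.dedup_eq_ofList]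
    apply (List.perm_ext_iff_of_nodup ?_ ?_).2
    · intro a
      constructor
      · intro ha
        rcases List.mem_map.1 ha with ⟨t, ht, rfl⟩
        have htmem := (PySem.Set.mem_ofList _ _).1 ht
        have htN : t ∈ N := (List.mem_filter.1 htmem).1
        have htp := (List.mem_filter.1 htmem).2
        have htAL : t ∈ pvAllowedOrder := by
          have := pvMem_allowed t
          rw [this] at htp
          exact of_decide_eq_true htp
        exact List.mem_filterMap.2 ⟨t, htAL, by rw [pvIndex?_of_mem t N htN]; rfl⟩
      · intro ha
        rcases List.mem_filterMap.1 ha with ⟨t, ht, hg⟩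
        cases hidx : PySem.List.index? N t with
        | none => rw [hidx] at hg; simp at hg
        | some k =>
        rw [hidx] at hg
        simp at hg
        subst hg
        have htN : t ∈ N := by
          have := PySem.List.index?_isSome_iff N t
          rw [hidx] at this
          simpa using this
        rw [pvIndex?_of_mem t N htN] at hidx
        have hkk : k = N.idxOf t := by injection hidx with h; exact h.symm
        subst hkk
        refine List.mem_map.2 ⟨t, ?_, rfl⟩
        refine (PySem.Set.mem_ofList _ _).2 (List.mem_filter.2 ⟨htN, ?_⟩)
        rw [pvMem_allowed t]
        exact decide_eq_true ht
    · -- Nodup of map over dedup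
      refine List.Nodup.map ?_ (PySem.Set.nodup_ofList _)
      intro a b hab
      exact congrArg Prod.snd hab
    · -- Nodup of filterMap
      refine List.Nodup.filterMap ?_ (by decide)
      intro a a' b hb hb'
      have hb2 := Option.mem_def.1 hb
      have hb2' := Option.mem_def.1 hb'
      cases h1 : PySem.List.index? N a with
      | none => rw [h1] at hb2; simp at hb2
      | some k =>
      cases h2 : PySem.List.index? N a' with
      | none => rw [h2] at hb2'; simp at hb2'
      | some k' =>
      rw [h1] at hb2; rw [h2] at hb2'
      simp at hb2 hb2'
      rw [← hb2] at hb2'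
      exact (congrArg Prod.snd hb2').symm
  · -- Pairwise strictly increasing keys
    refine List.pairwise_map.2 ?_
    have := pvDedup_filter_pairwise_idx (fun item => PySem.Set.contains pvAllowedA item) N
    refine this.imp ?_
    intro a b h
    exact Int.ofNat_lt.2 h

lemma pvPositions_nil_iff (raw_types : List String) :
    pvPositions (pvNormB raw_types) = [] ↔ pvFiltered raw_types = [] := by
  rw [pvPositions_eq_filterMap]
  constructor
  · intro h
    rw [List.filterMap_eq_nil_iff] at h
    rw [pvFiltered, List.filter_eq_nil_iff]
    intro a ha hpa
    have haAL : a ∈ pvAllowedOrder := by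
      rw [pvMem_allowed a] at hpa
      exact of_decide_eq_true hpa
    have := h a haAL
    rw [pvIndex?_of_mem a _ ha] at this
    simp at this
  · intro h
    rw [List.filterMap_eq_nil_iff]
    intro t ht
    cases hk : PySem.List.index? (pvNormB raw_types) t with
    | none => simp
    | some k =>
      exfalso
      have htN : t ∈ pvNormB raw_types := by
        have := PySem.List.index?_isSome_iff (pvNormB raw_types) t
        rw [hk] at this; simpa using this
      have : t ∈ pvFiltered raw_types := by
        refine List.mem_filter.2 ⟨htN, ?_⟩
        rw [pvMem_allowed t]
        exact decide_eq_true ht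
      rw [h] at this
      simp at this

-- ===== VERDICT (by name: the statement is the Claim_ definition above) =====
theorem normalize_allowed_file_types_py_spec : Claim_equal_normalize_allowed_file_types_py := by
  intro raw _
  show normalize_allowed_file_types_py raw = normalize_allowed_file_types_py_alt raw
  have hA : normalize_allowed_file_types_py raw
      = (if pvFiltered raw = [] then ["images", "documents", "videos", "other"]
         else PySem.List.dedup (pvFiltered raw)) := rfl
  have hB : normalize_allowed_file_types_py_alt raw
      = (if pvPositions (pvNormB raw) = [] then ["images", "documents", "videos", "other"]
         else (PySem.List.sorted (pvPositions (pvNormB raw)) (fun p => p.1) false).map (fun p => p.2)) := rfl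
  rw [hA, hB]
  by_cases hf : pvFiltered raw = []
  · rw [if_pos hf, if_pos ((pvPositions_nil_iff raw).2 hf)]
  · rw [if_neg hf, if_neg (fun h => hf ((pvPositions_nil_iff raw).1 h)), pvSorted_positions]
    simp [List.map_map, Function.comp_def]
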